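-- pv_equiv track=rewrite | github.com/Hoegh07/Project-Euler | Euler641/Euler641.py | powerful
-- ===== SOURCE A (Python) =====
-- def powerful(P,N,p,prod,pos,s):
--     total = 0
--     for i in range(pos,len(P)):
--         prodd = prod*P[i]
--         c = N//(prodd**p)
--         if(c < 1):
--             break
--         total += c*s+powerful(P,N,p,prodd,i+1,s*(-1))
--     return total
-- ===== SOURCE B (Python) =====
-- def powerful(P, N, p, prod, pos, s):
--     # Explicit worklist instead of recursion: each stack entry (pr, po, sg)
--     # stands for one pending recursive call; summation order is irrelevant.
--     total = 0
--     stack = [(prod, pos, s)]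
--     while stack:
--         pr, po, sg = stack.pop()
--         for i in range(po, len(P)):
--             prodd = pr * P[i]
--             c = N // (prodd ** p)
--             if c < 1:
--                 break
--             total += c * sg
--             stack.append((prodd, i + 1, -sg))
--     return total
-- ===== Notes on version B (the rewrite author's own statement) =====
-- stated objective: alternative
-- what changed: The tree recursion is replaced by an explicit worklist: a stack of pending (prod, pos, sign) states is popped and each popped state runs the inner loop once, pushing deeper states instead of recursing; the total is a commutative sum so visiting order does not matter.
-- outside the precondition, e.g. on powerful([2], 0, -1, 1, 0, 1): A returns 0, B returns 0
import Mathlib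
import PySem

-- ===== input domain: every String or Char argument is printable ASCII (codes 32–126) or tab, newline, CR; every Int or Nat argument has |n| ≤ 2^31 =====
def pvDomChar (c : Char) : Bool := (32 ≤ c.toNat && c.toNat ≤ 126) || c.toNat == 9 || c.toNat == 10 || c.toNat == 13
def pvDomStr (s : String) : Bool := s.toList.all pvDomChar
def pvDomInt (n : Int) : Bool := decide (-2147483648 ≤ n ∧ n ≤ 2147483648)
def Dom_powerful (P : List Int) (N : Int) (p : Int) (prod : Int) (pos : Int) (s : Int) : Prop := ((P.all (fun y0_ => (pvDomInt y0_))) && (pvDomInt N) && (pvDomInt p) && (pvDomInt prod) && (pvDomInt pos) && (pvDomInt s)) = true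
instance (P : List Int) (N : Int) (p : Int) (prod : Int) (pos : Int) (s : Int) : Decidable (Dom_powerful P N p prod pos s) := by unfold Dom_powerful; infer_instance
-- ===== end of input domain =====

-- B replaces A's tree recursion by an explicit worklist (stack of pending states); same cost, different decomposition.


-- ===== PORT A =====
-- The `for i in range(pos, len(P))` loop with its break and the recursive call
-- `powerful(P,N,p,prodd,i+1,-s)` become one structural recursion on the index i;
-- `powerful pos` is exactly the loop started at i = pos, so the recursive call is
-- `powLoopA … prodd (s*(-1)) (i+1)`.  The Nat fuel only makes the recursion
-- structural: it starts at (len-i).toNat, the exact number of remaining loop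
-- iterations, and is re-supplied exactly at each call, so it never runs out.
-- P[i] uses Python indexing (negative i wraps); `.getD 0` and `p.toNat` are junk
-- only outside Pre_ (there Python raises IndexError/ZeroDivisionError, or leaves
-- int for float).
def powLoopA (P : List Int) (N : Int) (p : Int) (prod : Int) (s : Int) (i : Int) : Nat → Int
  | 0 => 0
  | n + 1 =>
    if i < (P.length : Int) then
      let prodd := prod * (PySem.List.pyGet? P i).getD 0
      let c := PySem.Int.floordiv N (prodd ^ p.toNat)
      if c < 1 then 0
      else c * s + powLoopA P N p prodd (s * (-1)) (i + 1) n + powLoopA P N p prod s (i + 1) n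
    else 0

def powerful (P : List Int) (N : Int) (p : Int) (prod : Int) (pos : Int) (s : Int) : Int :=
  powLoopA P N p prod s pos (((P.length : Int) - pos).toNat)

-- ===== PORT B =====
-- Stack entries are (prod, pos, sign); `stack.append`/`stack.pop` = cons/head.
-- bInner is B's inner `for i in range(po, len(P))` loop threading (total, stack);
-- its fuel is again the exact remaining iteration count (len - i).toNat.
def bInner (P : List Int) (N : Int) (p : Int) (pr : Int) (sg : Int) (i : Int)
    (t : Int) (st : List (Int × Int × Int)) : Nat → Int × List (Int × Int × Int)
  | 0 => (t, st)
  | n + 1 =>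
    if i < (P.length : Int) then
      let prodd := pr * (PySem.List.pyGet? P i).getD 0
      let c := PySem.Int.floordiv N (prodd ^ p.toNat)
      if c < 1 then (t, st)
      else bInner P N p pr sg (i + 1) (t + c * sg) ((prodd, i + 1, -sg) :: st) n
    else (t, st)

-- fuel bound for the while-loop: an entry at position po can cause at most
-- 2^(len+1-po) pops, so the stack's total weight bounds the number of pops
def stackW (L : Int) (st : List (Int × Int × Int)) : Nat :=
  (st.map (fun e => 2 ^ ((L + 1 - e.2.1).toNat))).sum

-- bDrive is B's `while stack:` loop; fuel stackW bounds its pop count exactly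
def bDrive (P : List Int) (N : Int) (p : Int) (t : Int) (st : List (Int × Int × Int)) : Nat → Int
  | 0 => t
  | f + 1 =>
    match st with
    | [] => t
    | (pr, po, sg) :: rest =>
        let r := bInner P N p pr sg po t rest (((P.length : Int) - po).toNat)
        bDrive P N p r.1 r.2 f

def powerful_alt (P : List Int) (N : Int) (p : Int) (prod : Int) (pos : Int) (s : Int) : Int :=
  bDrive P N p 0 [(prod, pos, s)] (stackW (P.length : Int) [(prod, pos, s)])

-- ===== PRECONDITION & SPEC =====
-- pvElem P i = P[i] with Python indexing (only applied at valid indices below)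
def pvElem (P : List Int) (i : Int) : Int := (PySem.List.pyGet? P i).getD 0

-- pvReachZero: static characterisation of when A's recursion reaches a zero
-- element and so divides by zero (for p ≥ 1, prod ≠ 0): letting j be the first
-- index ≥ pos with P[j] = 0, some subset S of the indices in [pos, j) gives a
-- chain of products that never triggers the `c < 1` break before j, i.e. for
-- every i in [pos, j), N // (prod · Π{m ∈ S, m < i} P[m] · P[i])^p ≥ 1.
def pvReachZero (P : List Int) (N : Int) (p : Int) (prod : Int) (pos : Int) : Bool :=
  let idxs := PySem.List.pyRange pos (P.length : Int) 1
  match idxs.find? (fun i => pvElem P i == 0) with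
  | none => false
  | some j =>
    let pre := idxs.filter (fun i => i < j)
    pre.sublists.any (fun S =>
      pre.all (fun i =>
        decide (1 ≤ PySem.Int.floordiv N
          ((prod * ((S.filter (fun m => m < i)).map (pvElem P)).prod * pvElem P i) ^ p.toNat))))

-- Pre_ excludes exactly the inputs on which the Python A does not return an int:
-- pos below -len(P) (IndexError at P[pos]); negative p when the loop runs (prodd**p
-- is a float, so A returns a float — except when an immediate break still yields the
-- int 0, a float-arithmetic corner excluded too, see cites); and, for p ≥ 1, the
-- inputs whose recursion reaches a zero product (prod = 0, or pvReachZero: a chain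
-- of subset products survives every break test up to the first zero element),
-- where A raises ZeroDivisionError.
def Pre_powerful (P : List Int) (N : Int) (p : Int) (prod : Int) (pos : Int) (s : Int) : Prop :=
  -(P.length : Int) ≤ pos ∧ (pos < (P.length : Int) → 0 ≤ p) ∧
    (pos < (P.length : Int) → 1 ≤ p → (prod ≠ 0 ∧ pvReachZero P N p prod pos = false))
instance (P : List Int) (N : Int) (p : Int) (prod : Int) (pos : Int) (s : Int) : Decidable (Pre_powerful P N p prod pos s) := by unfold Pre_powerful; infer_instance

def pvWitness_powerful : List Int × Int × Int × Int × Int × Int := ([2, 3], 20, 2, 1, 0, 1)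

def Spec_powerful (P : List Int) (N : Int) (p : Int) (prod : Int) (pos : Int) (s : Int) (out : Int) : Prop := out = powerful_alt P N p prod pos s
instance (P : List Int) (N : Int) (p : Int) (prod : Int) (pos : Int) (s : Int) (out : Int) : Decidable (Spec_powerful P N p prod pos s out) := by unfold Spec_powerful; infer_instance

-- ===== CLAIM (what is proved, stated in full; the proofs are below) =====
def Claim_equal_powerful : Prop := ∀ (P : List Int) (N : Int) (p : Int) (prod : Int) (pos : Int) (s : Int), Dom_powerful P N p prod pos s → Pre_powerful P N p prod pos s → Spec_powerful P N p prod pos s (powerful P N p prod pos s)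

-- ===== LEMMAS AND PROOFS =====

-- the value A assigns to a whole stack: sum of the recursive results of its entries
def stackVal (P : List Int) (N : Int) (p : Int) (st : List (Int × Int × Int)) : Int :=
  (st.map (fun e => powLoopA P N p e.1 e.2.2 e.2.1 (((P.length : Int) - e.2.1).toNat))).sum

theorem bInner_weight (P : List Int) (N : Int) (p : Int) (pr : Int) (sg : Int) :
    ∀ (n : Nat) (i t : Int) (st : List (Int × Int × Int)), n = (((P.length : Int) - i).toNat) →
      stackW (P.length : Int) (bInner P N p pr sg i t st n).2 ≤
        stackW (P.length : Int) st + (2 ^ (((P.length : Int) + 1 - i).toNat) - 2) := by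
  intro n
  induction n with
  | zero => intro i t st _; simp [bInner]
  | succ n ih =>
      intro i t st hn
      have hiL : i < (P.length : Int) := by omega
      rw [bInner, if_pos hiL]
      by_cases hc : PySem.Int.floordiv N ((pr * (PySem.List.pyGet? P i).getD 0) ^ p.toNat) < 1
      · rw [if_pos hc]; simp
      · rw [if_neg hc]
        have hn' : n = (((P.length : Int) - (i + 1)).toNat) := by omega
        have ih' := ih (i + 1) (t + PySem.Int.floordiv N ((pr * (PySem.List.pyGet? P i).getD 0) ^ p.toNat) * sg)
          ((pr * (PySem.List.pyGet? P i).getD 0, i + 1, -sg) :: st) hn'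
        have h1 : ((((P.length : Int)) + 1 - i).toNat) = ((((P.length : Int)) + 1 - (i + 1)).toNat) + 1 := by omega
        simp only [stackW, List.map_cons, List.sum_cons] at ih' ⊢
        rw [h1, pow_succ]
        generalize hA : (2 : Nat) ^ ((((P.length : Int)) + 1 - (i + 1)).toNat) = A at ih' ⊢
        have hA2 : 2 ≤ A := by
          rw [← hA]; exact Nat.one_lt_two_pow_iff.mpr (by omega)
        omega

theorem bInner_spec (P : List Int) (N : Int) (p : Int) (pr : Int) (sg : Int) :
    ∀ (n : Nat) (i t : Int) (st : List (Int × Int × Int)), n = (((P.length : Int) - i).toNat) →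
      (bInner P N p pr sg i t st n).1 + stackVal P N p (bInner P N p pr sg i t st n).2 =
        t + stackVal P N p st + powLoopA P N p pr sg i n := by
  intro n
  induction n with
  | zero => intro i t st _; simp [bInner, powLoopA]
  | succ n ih =>
      intro i t st hn
      have hiL : i < (P.length : Int) := by omega
      rw [bInner, powLoopA, if_pos hiL, if_pos hiL]
      by_cases hc : PySem.Int.floordiv N ((pr * (PySem.List.pyGet? P i).getD 0) ^ p.toNat) < 1
      · rw [if_pos hc, if_pos hc]; simp
      · rw [if_neg hc, if_neg hc]
        have hn' : n = (((P.length : Int) - (i + 1)).toNat) := by omega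
        have ih' := ih (i + 1) (t + PySem.Int.floordiv N ((pr * (PySem.List.pyGet? P i).getD 0) ^ p.toNat) * sg)
          ((pr * (PySem.List.pyGet? P i).getD 0, i + 1, -sg) :: st) hn'
        simp only [stackVal, List.map_cons, List.sum_cons] at ih' ⊢
        rw [← hn'] at ih'
        have hsg : sg * (-1) = -sg := by ring
        rw [hsg]
        linarith [ih']

theorem bDrive_spec (P : List Int) (N : Int) (p : Int) :
    ∀ (f : Nat) (t : Int) (st : List (Int × Int × Int)), stackW (P.length : Int) st ≤ f →
      bDrive P N p t st f = t + stackVal P N p st := by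
  intro f
  induction f with
  | zero =>
      intro t st hf
      match st with
      | [] => simp [bDrive, stackVal]
      | (pr, po, sg) :: rest =>
          exfalso
          have h1 : (1 : Nat) ≤ 2 ^ (((P.length : Int) + 1 - po).toNat) := Nat.one_le_two_pow
          simp only [stackW, List.map_cons, List.sum_cons] at hf
          omega
  | succ f ih =>
      intro t st hf
      match st with
      | [] => simp [bDrive, stackVal]
      | (pr, po, sg) :: rest =>
          rw [bDrive]
          have hw := bInner_weight P N p pr sg (((P.length : Int) - po).toNat) po t rest rfl
          have h2 : (1 : Nat) ≤ 2 ^ (((P.length : Int) + 1 - po).toNat) := Nat.one_le_two_pow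
          have hfuel : stackW (P.length : Int) (bInner P N p pr sg po t rest (((P.length : Int) - po).toNat)).2 ≤ f := by
            simp only [stackW, List.map_cons, List.sum_cons] at hf ⊢
            simp only [stackW] at hw
            omega
          rw [ih _ _ hfuel]
          have hs := bInner_spec P N p pr sg (((P.length : Int) - po).toNat) po t rest rfl
          simp only [stackVal, List.map_cons, List.sum_cons] at hs ⊢
          linarith [hs]

-- ===== VERDICT (by name: the statement is the Claim_ definition above) =====
theorem powerful_spec : Claim_equal_powerful := by
  intro P N p prod pos s _ _
  unfold Spec_powerful powerful powerful_alt
  rw [bDrive_spec P N p _ 0 [(prod, pos, s)] le_rfl]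
  simp [stackVal]
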